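-- pv_equiv track=rewrite | github.com/Sivas039/Medical-Symptom-Checker | gradio_app.py | extract_severity_from_diagnosis
-- ===== SOURCE A (Python) =====
-- def extract_severity_from_diagnosis(diagnosis: str) -> str:
--     """Extract severity level from diagnosis text"""
--     diagnosis_lower = diagnosis.lower()
--
--     if any(w in diagnosis_lower for w in ["emergency", "immediate", "urgent", "911", "108"]):
--         return "Emergency"
--     elif any(w in diagnosis_lower for w in ["high", "severe", "serious"]):
--         return "High - Needs attention"
--     elif any(w in diagnosis_lower for w in ["moderate", "concerning"]):
--         return "Moderate - Should see a doctor"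
--     else:
--         return "Mild - Monitor symptoms"
-- ===== SOURCE B (Python) =====
-- _KEYWORD_RANKS = [
--     ("emergency", 0), ("immediate", 0), ("urgent", 0), ("911", 0), ("108", 0),
--     ("high", 1), ("severe", 1), ("serious", 1),
--     ("moderate", 2), ("concerning", 2),
-- ]
-- _LABELS = ["Emergency", "High - Needs attention",
--            "Moderate - Should see a doctor", "Mild - Monitor symptoms"]
--
-- def extract_severity_from_diagnosis(diagnosis: str) -> str:
--     # One left-to-right scan over the text: at each position try to match a
--     # keyword by prefix and keep the minimum (most severe) rank seen so far.
--     text = diagnosis.lower()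
--     best = 3
--     for i in range(len(text)):
--         for kw, rank in _KEYWORD_RANKS:
--             if rank < best and text.startswith(kw, i):
--                 best = rank
--     return _LABELS[best]
-- ===== Notes on version B (the rewrite author's own statement) =====
-- stated objective: alternative
-- what changed: Replaced the per-keyword substring-containment cascade by a single left-to-right positional scan that prefix-matches keywords at each index and keeps the minimum severity rank in an accumulator, then indexes a label table.
import Mathlib
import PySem

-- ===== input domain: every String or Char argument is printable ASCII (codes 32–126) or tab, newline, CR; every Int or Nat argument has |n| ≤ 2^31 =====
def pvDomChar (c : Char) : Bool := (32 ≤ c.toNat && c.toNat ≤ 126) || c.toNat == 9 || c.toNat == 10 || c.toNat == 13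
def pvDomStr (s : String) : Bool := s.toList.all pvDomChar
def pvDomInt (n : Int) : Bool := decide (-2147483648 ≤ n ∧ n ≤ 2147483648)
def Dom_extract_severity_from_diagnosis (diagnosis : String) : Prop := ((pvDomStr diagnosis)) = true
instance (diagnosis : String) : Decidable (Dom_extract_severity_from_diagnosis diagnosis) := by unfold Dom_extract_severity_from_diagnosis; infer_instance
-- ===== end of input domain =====

-- B replaces A's substring-containment cascade with one positional scan keeping a minimum-rank accumulator (alternative algorithm, same cost).

-- ===== PORT A =====
def extract_severity_from_diagnosis (diagnosis : String) : String :=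
  let diagnosis_lower := PySem.Str.lower diagnosis
  if ["emergency", "immediate", "urgent", "911", "108"].any (fun w => PySem.Str.isIn w diagnosis_lower) then
    "Emergency"
  else if ["high", "severe", "serious"].any (fun w => PySem.Str.isIn w diagnosis_lower) then
    "High - Needs attention"
  else if ["moderate", "concerning"].any (fun w => PySem.Str.isIn w diagnosis_lower) then
    "Moderate - Should see a doctor"
  else
    "Mild - Monitor symptoms"

-- ===== PORT B =====
def pvKeywordRanks : List (String × Nat) :=
  [("emergency", 0), ("immediate", 0), ("urgent", 0), ("911", 0), ("108", 0),
   ("high", 1), ("severe", 1), ("serious", 1),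
   ("moderate", 2), ("concerning", 2)]

def pvLabels : List String :=
  ["Emergency", "High - Needs attention", "Moderate - Should see a doctor", "Mild - Monitor symptoms"]

-- inner loop body: text.startswith(kw, i) for 0 ≤ i ≤ len(text) is exactly a prefix test on text.drop i
def pvStep (t : List Char) (i : Nat) (b : Nat) : Nat :=
  pvKeywordRanks.foldl
    (fun b p => if p.2 < b ∧ PySem.Chars.startswith (t.drop i) p.1.toList then p.2 else b) b

def pvBest (t : List Char) : Nat :=
  (List.range t.length).foldl (fun b i => pvStep t i b) 3

def extract_severity_from_diagnosis_alt (diagnosis : String) : String :=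
  let text := PySem.Str.lower diagnosis
  -- LABELS[best]: best ≤ 3 always (the accumulator only decreases from 3), so the index is in range
  (pvLabels.getD (pvBest text.toList) "")

-- ===== PRECONDITION & SPEC =====
def Spec_extract_severity_from_diagnosis (diagnosis : String) (out : String) : Prop := out = extract_severity_from_diagnosis_alt diagnosis
instance (diagnosis : String) (out : String) : Decidable (Spec_extract_severity_from_diagnosis diagnosis out) := by unfold Spec_extract_severity_from_diagnosis; infer_instance

-- ===== CLAIM (what is proved, stated in full; the proofs are below) =====
def Claim_equal_extract_severity_from_diagnosis : Prop := ∀ (diagnosis : String), Dom_extract_severity_from_diagnosis diagnosis → Spec_extract_severity_from_diagnosis diagnosis (extract_severity_from_diagnosis diagnosis)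

-- ===== LEMMAS AND PROOFS =====

theorem pvFoldl_le_init {α : Type} (f : Nat → α → Nat) (h : ∀ b x, f b x ≤ b) :
    ∀ (l : List α) (b : Nat), List.foldl f b l ≤ b := by
  intro l
  induction l with
  | nil => intro b; simp
  | cons x xs ih => intro b; exact le_trans (ih (f b x)) (h b x)

theorem pvFoldl_le_of_mem {α : Type} (f : Nat → α → Nat) (h : ∀ b x, f b x ≤ b)
    (x : α) (r : Nat) (hx : ∀ b, f b x ≤ r) :
    ∀ (l : List α) (b : Nat), x ∈ l → List.foldl f b l ≤ r := by
  intro l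
  induction l with
  | nil => intro b hb; simp at hb
  | cons y ys ih =>
      intro b hb
      rcases List.mem_cons.mp hb with h1 | h2
      · subst h1; exact le_trans (pvFoldl_le_init f h ys (f b x)) (hx b)
      · exact ih (f b y) h2

theorem pvFoldl_ge {α : Type} (f : Nat → α → Nat) (m : Nat) (l : List α)
    (h : ∀ b x, x ∈ l → m ≤ b → m ≤ f b x) :
    ∀ b, m ≤ b → m ≤ List.foldl f b l := by
  induction l with
  | nil => intro b hb; simpa using hb
  | cons y ys ih =>
      intro b hb
      exact ih (fun b x hx hm => h b x (List.mem_cons_of_mem _ hx) hm) (f b y)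
        (h b y (List.mem_cons_self) hb)

theorem pvStep_le (t : List Char) (i : Nat) (b : Nat) : pvStep t i b ≤ b := by
  refine pvFoldl_le_init _ ?_ _ b
  intro b p
  dsimp only
  split_ifs with h
  · omega
  · exact le_refl b

theorem pvStep_le_of_match (t : List Char) (i : Nat) (kw : String) (r : Nat)
    (hmem : (kw, r) ∈ pvKeywordRanks)
    (hsw : PySem.Chars.startswith (t.drop i) kw.toList = true) :
    ∀ b, pvStep t i b ≤ r := by
  intro b
  refine pvFoldl_le_of_mem _ ?_ (kw, r) r ?_ _ b hmem
  · intro b p; dsimp only; split_ifs with h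
    · omega
    · exact le_refl b
  · intro b; dsimp only
    split_ifs with h
    · exact le_refl r
    · rw [not_and] at h
      by_cases hr : r < b
      · exact absurd hsw (h hr)
      · omega

theorem pvStep_ge (t : List Char) (i : Nat) (m : Nat)
    (h : ∀ kw r, (kw, r) ∈ pvKeywordRanks →
        PySem.Chars.startswith (t.drop i) kw.toList = true → m ≤ r) :
    ∀ b, m ≤ b → m ≤ pvStep t i b := by
  intro b hb
  refine pvFoldl_ge _ m _ ?_ b hb
  intro b p hp hm
  dsimp only
  split_ifs with hc
  · exact h p.1 p.2 hp hc.2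
  · exact hm

theorem pvBest_le_three (t : List Char) : pvBest t ≤ 3 :=
  pvFoldl_le_init _ (fun b i => pvStep_le t i b) _ 3

theorem pvBest_le (t : List Char) (kw : String) (r : Nat)
    (hmem : (kw, r) ∈ pvKeywordRanks) (hne : kw.toList ≠ [])
    (hin : PySem.Chars.isIn kw.toList t = true) : pvBest t ≤ r := by
  obtain ⟨j, hj⟩ := (PySem.Chars.exists_prefix_drop_iff_isIn kw.toList t).mpr hin
  have hjlt : j < t.length := by
    by_contra hge
    push Not at hge
    rw [List.drop_eq_nil_of_le hge] at hj
    exact hne (List.prefix_nil.mp hj)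
  refine pvFoldl_le_of_mem _ (fun b i => pvStep_le t i b) j r ?_ _ 3
    (List.mem_range.mpr hjlt)
  intro b
  exact pvStep_le_of_match t j kw r hmem ((PySem.Chars.startswith_iff _ _).mpr hj) b

theorem pvBest_ge (t : List Char) (m : Nat) (hm3 : m ≤ 3)
    (h : ∀ kw r, (kw, r) ∈ pvKeywordRanks → r < m →
        PySem.Chars.isIn kw.toList t = false) : m ≤ pvBest t := by
  refine pvFoldl_ge _ m _ ?_ 3 hm3
  intro b i hi hb
  refine pvStep_ge t i m ?_ b hb
  intro kw r hmem hsw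
  by_contra hlt
  push Not at hlt
  have hfalse := h kw r hmem hlt
  have hpre : kw.toList <+: t.drop i := (PySem.Chars.startswith_iff _ _).mp hsw
  have : PySem.Chars.isIn kw.toList t = true :=
    (PySem.Chars.exists_prefix_drop_iff_isIn kw.toList t).mp ⟨i, hpre⟩
  rw [hfalse] at this
  exact Bool.false_ne_true this

-- ===== VERDICT (by name: the statement is the Claim_ definition above) =====
theorem extract_severity_from_diagnosis_spec : Claim_equal_extract_severity_from_diagnosis := by
  intro d _
  show extract_severity_from_diagnosis d = extract_severity_from_diagnosis_alt d
  unfold extract_severity_from_diagnosis extract_severity_from_diagnosis_alt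
  simp only [PySem.Str.isIn_eq, PySem.Str.toList_lower, List.any_cons, List.any_nil,
    Bool.or_false]
  set L := PySem.Chars.lower d.toList with hL
  by_cases h0 : (PySem.Chars.isIn "emergency".toList L ||
      (PySem.Chars.isIn "immediate".toList L || (PySem.Chars.isIn "urgent".toList L ||
      (PySem.Chars.isIn "911".toList L || PySem.Chars.isIn "108".toList L)))) = true
  · -- some rank-0 keyword occurs → best = 0
    have hbest : pvBest L = 0 := by
      have hle : pvBest L ≤ 0 := by
        simp only [Bool.or_eq_true] at h0
        rcases h0 with (h|h|h|h|h)
        · exact pvBest_le L "emergency" 0 (by decide) (by decide) h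
        · exact pvBest_le L "immediate" 0 (by decide) (by decide) h
        · exact pvBest_le L "urgent" 0 (by decide) (by decide) h
        · exact pvBest_le L "911" 0 (by decide) (by decide) h
        · exact pvBest_le L "108" 0 (by decide) (by decide) h
      omega
    rw [if_pos h0, hbest]
    rfl
  · have h0' : ∀ w ∈ (["emergency", "immediate", "urgent", "911", "108"] : List String),
        PySem.Chars.isIn w.toList L = false := by
      simp only [Bool.or_eq_true, not_or] at h0
      intro w hw
      simp only [List.mem_cons, List.not_mem_nil, or_false] at hw
      rcases hw with rfl | rfl | rfl | rfl | rfl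
      · exact Bool.eq_false_iff.mpr h0.1
      · exact Bool.eq_false_iff.mpr h0.2.1
      · exact Bool.eq_false_iff.mpr h0.2.2.1
      · exact Bool.eq_false_iff.mpr h0.2.2.2.1
      · exact Bool.eq_false_iff.mpr h0.2.2.2.2
    rw [if_neg h0]
    by_cases h1 : (PySem.Chars.isIn "high".toList L ||
        (PySem.Chars.isIn "severe".toList L || PySem.Chars.isIn "serious".toList L)) = true
    · have hbest : pvBest L = 1 := by
        have hle : pvBest L ≤ 1 := by
          simp only [Bool.or_eq_true] at h1
          rcases h1 with (h|h|h)
          · exact pvBest_le L "high" 1 (by decide) (by decide) h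
          · exact pvBest_le L "severe" 1 (by decide) (by decide) h
          · exact pvBest_le L "serious" 1 (by decide) (by decide) h
        have hge : 1 ≤ pvBest L := by
          refine pvBest_ge L 1 (by omega) ?_
          intro kw r hmem hr
          simp only [pvKeywordRanks, List.mem_cons, List.not_mem_nil, or_false,
            Prod.mk.injEq] at hmem
          rcases hmem with ⟨rfl, rfl⟩|⟨rfl, rfl⟩|⟨rfl, rfl⟩|⟨rfl, rfl⟩|⟨rfl, rfl⟩|
            ⟨rfl, rfl⟩|⟨rfl, rfl⟩|⟨rfl, rfl⟩|⟨rfl, rfl⟩|⟨rfl, rfl⟩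
          · exact h0' _ (by decide)
          · exact h0' _ (by decide)
          · exact h0' _ (by decide)
          · exact h0' _ (by decide)
          · exact h0' _ (by decide)
          all_goals omega
        omega
      rw [if_pos h1, hbest]
      rfl
    · have h1' : ∀ w ∈ (["high", "severe", "serious"] : List String),
          PySem.Chars.isIn w.toList L = false := by
        simp only [Bool.or_eq_true, not_or] at h1
        intro w hw
        simp only [List.mem_cons, List.not_mem_nil, or_false] at hw
        rcases hw with rfl | rfl | rfl
        · exact Bool.eq_false_iff.mpr h1.1
        · exact Bool.eq_false_iff.mpr h1.2.1
        · exact Bool.eq_false_iff.mpr h1.2.2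
      rw [if_neg h1]
      by_cases h2 : (PySem.Chars.isIn "moderate".toList L ||
          PySem.Chars.isIn "concerning".toList L) = true
      · have hbest : pvBest L = 2 := by
          have hle : pvBest L ≤ 2 := by
            simp only [Bool.or_eq_true] at h2
            rcases h2 with h|h
            · exact pvBest_le L "moderate" 2 (by decide) (by decide) h
            · exact pvBest_le L "concerning" 2 (by decide) (by decide) h
          have hge : 2 ≤ pvBest L := by
            refine pvBest_ge L 2 (by omega) ?_
            intro kw r hmem hr
            simp only [pvKeywordRanks, List.mem_cons, List.not_mem_nil, or_false,
              Prod.mk.injEq] at hmem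
            rcases hmem with ⟨rfl, rfl⟩|⟨rfl, rfl⟩|⟨rfl, rfl⟩|⟨rfl, rfl⟩|⟨rfl, rfl⟩|
              ⟨rfl, rfl⟩|⟨rfl, rfl⟩|⟨rfl, rfl⟩|⟨rfl, rfl⟩|⟨rfl, rfl⟩
            · exact h0' _ (by decide)
            · exact h0' _ (by decide)
            · exact h0' _ (by decide)
            · exact h0' _ (by decide)
            · exact h0' _ (by decide)
            · exact h1' _ (by decide)
            · exact h1' _ (by decide)
            · exact h1' _ (by decide)
            all_goals omega
          omega
        rw [if_pos h2, hbest]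
        rfl
      · have h2' : ∀ w ∈ (["moderate", "concerning"] : List String),
            PySem.Chars.isIn w.toList L = false := by
          simp only [Bool.or_eq_true, not_or] at h2
          intro w hw
          simp only [List.mem_cons, List.not_mem_nil, or_false] at hw
          rcases hw with rfl | rfl
          · exact Bool.eq_false_iff.mpr h2.1
          · exact Bool.eq_false_iff.mpr h2.2
        have hbest : pvBest L = 3 := by
          have hge : 3 ≤ pvBest L := by
            refine pvBest_ge L 3 (by omega) ?_
            intro kw r hmem hr
            simp only [pvKeywordRanks, List.mem_cons, List.not_mem_nil, or_false,
              Prod.mk.injEq] at hmem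
            rcases hmem with ⟨rfl, rfl⟩|⟨rfl, rfl⟩|⟨rfl, rfl⟩|⟨rfl, rfl⟩|⟨rfl, rfl⟩|
              ⟨rfl, rfl⟩|⟨rfl, rfl⟩|⟨rfl, rfl⟩|⟨rfl, rfl⟩|⟨rfl, rfl⟩
            · exact h0' _ (by decide)
            · exact h0' _ (by decide)
            · exact h0' _ (by decide)
            · exact h0' _ (by decide)
            · exact h0' _ (by decide)
            · exact h1' _ (by decide)
            · exact h1' _ (by decide)
            · exact h1' _ (by decide)
            · exact h2' _ (by decide)
            · exact h2' _ (by decide)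
          have := pvBest_le_three L
          omega
        rw [if_neg h2, hbest]
        rfl
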